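-- pv_equiv track=rewrite | github.com/swetha22p/MRBG | repository/common_v4_non_mask.py | add_MORPHO_SEMANTIC
-- ===== SOURCE A (Python) =====
-- def add_MORPHO_SEMANTIC(full_data, MORPHO_SEMANTIC_DICT):
--     transformed_data = []
--     for data in full_data:
--         index = data[0]
--         if index in MORPHO_SEMANTIC_DICT:
--             temp = list(data)
--             term = MORPHO_SEMANTIC_DICT[index]
--             for t in term:
--                 tag = t[0]
--                 val = t[1]
--                 if tag == 'before':
--                     temp[1] = val + ' ' + temp[1]
--                 else:
--                     temp[1] = temp[1] + ' ' + val
--             data = tuple(temp)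
--         transformed_data.append(data)
--     return transformed_data
-- ===== SOURCE B (Python) =====
-- def add_MORPHO_SEMANTIC(full_data, MORPHO_SEMANTIC_DICT):
--     transformed_data = []
--     for data in full_data:
--         index = data[0]
--         if index in MORPHO_SEMANTIC_DICT:
--             terms = MORPHO_SEMANTIC_DICT[index]
--             befores = [v for tag, v in terms if tag == 'before']
--             afters = [v for tag, v in terms if tag != 'before']
--             data = (index, ' '.join(list(reversed(befores)) + [data[1]] + afters))
--         transformed_data.append(data)
--     return transformed_data
-- ===== Notes on version B (the rewrite author's own statement) =====
-- stated objective: simpler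
-- what changed: Instead of mutating the string once per term (prepend for 'before', append otherwise), B partitions the terms into before/after value lists in one pass and builds the result with a single ' '.join(reversed(befores) + [text] + afters).
import Mathlib
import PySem

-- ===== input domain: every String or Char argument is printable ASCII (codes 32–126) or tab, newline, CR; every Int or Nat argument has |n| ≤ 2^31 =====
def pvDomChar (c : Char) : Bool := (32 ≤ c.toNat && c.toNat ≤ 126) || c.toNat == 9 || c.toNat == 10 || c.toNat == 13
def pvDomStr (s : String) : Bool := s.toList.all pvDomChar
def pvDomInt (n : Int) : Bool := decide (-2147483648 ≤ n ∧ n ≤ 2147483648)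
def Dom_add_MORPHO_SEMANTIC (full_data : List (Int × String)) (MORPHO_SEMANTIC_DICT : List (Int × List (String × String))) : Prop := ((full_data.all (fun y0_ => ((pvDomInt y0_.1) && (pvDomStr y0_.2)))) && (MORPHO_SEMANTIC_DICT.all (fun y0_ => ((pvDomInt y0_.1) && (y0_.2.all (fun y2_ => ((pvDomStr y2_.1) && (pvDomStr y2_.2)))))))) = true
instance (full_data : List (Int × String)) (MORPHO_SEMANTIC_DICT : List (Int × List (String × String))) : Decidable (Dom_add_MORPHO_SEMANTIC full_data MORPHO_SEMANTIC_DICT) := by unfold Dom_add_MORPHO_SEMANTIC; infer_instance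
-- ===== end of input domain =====

-- B replaces A's repeated string prepending/appending inside the inner loop by one partition of the
-- terms into 'before'/'after' values and a single ' '.join (objective: simpler decomposition).

-- ===== PORT A =====
-- inner loop body of A: successive mutation of temp[1]
def pvStepA (s : String) (t : String × String) : String :=
  if t.1 == "before" then t.2 ++ " " ++ s else s ++ " " ++ t.2

def add_MORPHO_SEMANTIC (full_data : List (Int × String)) (MORPHO_SEMANTIC_DICT : List (Int × List (String × String))) : List (Int × String) :=
  full_data.foldl
    (fun transformed_data data =>
      -- 'index in dict' + 'dict[index]' = first-match lookup on the association list
      match MORPHO_SEMANTIC_DICT.lookup data.1 with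
      | some term => transformed_data ++ [(data.1, term.foldl pvStepA data.2)]
      | none => transformed_data ++ [data])
    []

-- ===== PORT B =====
def pvTransform (MORPHO_SEMANTIC_DICT : List (Int × List (String × String))) (data : Int × String) : Int × String :=
  match MORPHO_SEMANTIC_DICT.lookup data.1 with
  | some terms =>
      (data.1,
        PySem.Str.join " "
          (((terms.filter (fun t => t.1 == "before")).map Prod.snd).reverse
            ++ data.2 :: (terms.filter (fun t => !(t.1 == "before"))).map Prod.snd))
  | none => data

def add_MORPHO_SEMANTIC_alt (full_data : List (Int × String)) (MORPHO_SEMANTIC_DICT : List (Int × List (String × String))) : List (Int × String) :=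
  full_data.map (pvTransform MORPHO_SEMANTIC_DICT)

-- ===== PRECONDITION & SPEC =====
def Spec_add_MORPHO_SEMANTIC (full_data : List (Int × String)) (MORPHO_SEMANTIC_DICT : List (Int × List (String × String))) (out : List (Int × String)) : Prop := out = add_MORPHO_SEMANTIC_alt full_data MORPHO_SEMANTIC_DICT
instance (full_data : List (Int × String)) (MORPHO_SEMANTIC_DICT : List (Int × List (String × String))) (out : List (Int × String)) : Decidable (Spec_add_MORPHO_SEMANTIC full_data MORPHO_SEMANTIC_DICT out) := by unfold Spec_add_MORPHO_SEMANTIC; infer_instance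

-- ===== CLAIM (what is proved, stated in full; the proofs are below) =====
def Claim_equal_add_MORPHO_SEMANTIC : Prop := ∀ (full_data : List (Int × String)) (MORPHO_SEMANTIC_DICT : List (Int × List (String × String))), Dom_add_MORPHO_SEMANTIC full_data MORPHO_SEMANTIC_DICT → Spec_add_MORPHO_SEMANTIC full_data MORPHO_SEMANTIC_DICT (add_MORPHO_SEMANTIC full_data MORPHO_SEMANTIC_DICT)

-- ===== LEMMAS AND PROOFS =====

-- join with a nonempty tail
theorem pv_join_cons (sep p : List Char) (l : List (List Char)) (h : l ≠ []) :
    PySem.Chars.join sep (p :: l) = p ++ sep ++ PySem.Chars.join sep l := by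
  cases l with
  | nil => exact absurd rfl h
  | cons q rest => exact PySem.Chars.join_cons_cons sep p q rest

-- splitting one joined element that already contains the separator
theorem pv_join_mid (xs : List (List Char)) (a b : List Char) (ys : List (List Char)) :
    PySem.Chars.join [' '] (xs ++ (a ++ ' ' :: b) :: ys)
      = PySem.Chars.join [' '] (xs ++ a :: b :: ys) := by
  induction xs with
  | nil =>
    cases ys with
    | nil =>
      simp [PySem.Chars.join_singleton, PySem.Chars.join_cons_cons]
    | cons y ys' =>
      rw [List.nil_append, List.nil_append,
        PySem.Chars.join_cons_cons, PySem.Chars.join_cons_cons, PySem.Chars.join_cons_cons]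
      simp
  | cons x xs ih =>
    rw [List.cons_append, List.cons_append,
      pv_join_cons _ _ _ (by simp), pv_join_cons _ _ _ (by simp), ih]

-- A's inner fold equals B's partition-and-join, for any starting string
theorem pv_fold_eq_join (terms : List (String × String)) (s : String) :
    terms.foldl pvStepA s
      = PySem.Str.join " "
          (((terms.filter (fun t => t.1 == "before")).map Prod.snd).reverse
            ++ s :: (terms.filter (fun t => !(t.1 == "before"))).map Prod.snd) := by
  induction terms generalizing s with
  | nil =>
    apply String.toList_injective
    simp [PySem.Str.toList_join, PySem.Chars.join_singleton]
  | cons t ts ih =>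
    by_cases hb : (t.1 == "before") = true
    · simp only [List.foldl_cons, pvStepA, hb, if_pos, List.filter_cons, Bool.not_true,
        cond_true, List.map_cons, List.reverse_cons, ih]
      apply String.toList_injective
      simp only [PySem.Str.toList_join, List.map_append, List.map_cons, List.map_reverse]
      have := pv_join_mid (((ts.filter (fun t => t.1 == "before")).map Prod.snd).reverse.map String.toList)
        t.2.toList s.toList (((ts.filter (fun t => !(t.1 == "before"))).map Prod.snd).map String.toList)
      simpa using this
    · have hb' : (t.1 == "before") = false := by simpa using hb
      simp only [List.foldl_cons, pvStepA, hb', if_neg, Bool.false_eq_true, not_false_iff,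
        List.filter_cons, Bool.not_false, cond_true, cond_false, ih]
      apply String.toList_injective
      simp only [PySem.Str.toList_join, List.map_append, List.map_cons, List.map_reverse]
      have := pv_join_mid (((ts.filter (fun t => t.1 == "before")).map Prod.snd).reverse.map String.toList)
        s.toList t.2.toList (((ts.filter (fun t => !(t.1 == "before"))).map Prod.snd).map String.toList)
      simpa using this

-- A's append-accumulator loop is the map of its body
theorem pv_foldl_append_map (fd : List (Int × String)) (d : List (Int × List (String × String)))
    (init : List (Int × String)) :
    fd.foldl
      (fun transformed_data data =>
        match d.lookup data.1 with
        | some term => transformed_data ++ [(data.1, term.foldl pvStepA data.2)]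
        | none => transformed_data ++ [data])
      init
      = init ++ fd.map (pvTransform d) := by
  induction fd generalizing init with
  | nil => simp
  | cons x fd ih =>
    simp only [List.foldl_cons, List.map_cons, ih]
    cases hx : d.lookup x.1 with
    | none => simp [pvTransform, hx]
    | some term => simp [pvTransform, hx, pv_fold_eq_join]

-- ===== VERDICT (by name: the statement is the Claim_ definition above) =====
theorem add_MORPHO_SEMANTIC_spec : Claim_equal_add_MORPHO_SEMANTIC := by
  intro full_data d _
  show add_MORPHO_SEMANTIC full_data d = add_MORPHO_SEMANTIC_alt full_data d
  rw [add_MORPHO_SEMANTIC, add_MORPHO_SEMANTIC_alt, pv_foldl_append_map, List.nil_append]
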